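-- pv_equiv track=rewrite | github.com/OlhaBas/2024Python_lec_lab | Homework1/Task0.py | number_rows_with_longest_series
-- ===== SOURCE A (Python) =====
-- def number_rows_with_longest_series(matrix):
--     max_length = 0
--     row_index = -1
--
--     for i, row in enumerate(matrix):
--         current_length = 1
--         for j in range(1, len(row)):
--             if row[j] == row[j - 1]:
--                 current_length += 1
--             else:
--                 if current_length > max_length:
--                     max_length = current_length
--                     row_index = i
--                 current_length = 1
--
--         if current_length > max_length:
--             max_length = current_length
--             row_index = i
--
--     return row_index
-- ===== SOURCE B (Python) =====
-- def number_rows_with_longest_series(matrix):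
--     def run_lengths(row):
--         lens = []
--         n = 0
--         last = None
--         for x in row:
--             if n and x == last:
--                 n += 1
--             else:
--                 if n:
--                     lens.append(n)
--                 n = 1
--             last = x
--         if n:
--             lens.append(n)
--         return lens
--
--     def longest_run(row):
--         return max(run_lengths(row), default=1)
--
--     return max(range(len(matrix)), key=lambda i: longest_run(matrix[i]), default=-1)
-- ===== Notes on version B (the rewrite author's own statement) =====
-- stated objective: alternative
-- what changed: B decomposes the interleaved scan-and-update into two phases: a helper that materialises each row's run lengths and takes their max (empty row scores 1), and an argmax over row indices (earliest winner, -1 for empty matrix), replacing A's single fold that threads max_length/row_index through the inner scan.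
import Mathlib
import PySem

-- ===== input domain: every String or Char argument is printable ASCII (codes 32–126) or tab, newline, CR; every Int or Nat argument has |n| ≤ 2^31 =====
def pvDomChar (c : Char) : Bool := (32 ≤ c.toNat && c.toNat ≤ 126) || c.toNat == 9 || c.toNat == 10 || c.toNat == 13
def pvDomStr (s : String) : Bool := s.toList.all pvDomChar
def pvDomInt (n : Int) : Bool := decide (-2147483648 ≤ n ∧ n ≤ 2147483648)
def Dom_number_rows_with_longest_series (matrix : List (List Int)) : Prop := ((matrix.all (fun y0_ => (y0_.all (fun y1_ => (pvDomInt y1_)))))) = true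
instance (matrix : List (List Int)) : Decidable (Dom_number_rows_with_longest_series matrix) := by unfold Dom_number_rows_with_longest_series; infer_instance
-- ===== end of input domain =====

-- B rewrites A as two phases (per-row run lengths + max, then an argmax over indices)
-- instead of A's single scan threading max_length/row_index through the inner loop.

-- ===== PORT A =====
-- A's inner loop 'for j in range(1, len(row))' comparing row[j] to row[j-1] is expressed
-- as recursion over the tail of the row carrying prev = row[j-1] (exact: same comparisons,
-- same state updates (current_length, max_length, row_index) in the same order).
def pvARow (i : Int) (prev : Int) (rest : List Int) (cur maxL idx : Int) : Int × Int :=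
  match rest with
  | [] => if cur > maxL then (cur, i) else (maxL, idx)
  | x :: xs =>
    if x = prev then pvARow i x xs (cur + 1) maxL idx
    else if cur > maxL then pvARow i x xs 1 cur i
    else pvARow i x xs 1 maxL idx

def pvAOuter (i : Int) (rows : List (List Int)) (st : Int × Int) : Int × Int :=
  match rows with
  | [] => st
  | [] :: rs => pvAOuter (i + 1) rs (if 1 > st.1 then ((1 : Int), i) else st)  -- inner loop empty, current_length = 1
  | (p :: rest) :: rs => pvAOuter (i + 1) rs (pvARow i p rest 1 st.1 st.2)

def number_rows_with_longest_series (matrix : List (List Int)) : Int :=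
  (pvAOuter 0 matrix (0, -1)).2

-- ===== PORT B =====
-- Source B's run_lengths: list of lengths of maximal runs of equal adjacent elements.
def pvRunLens (prev : Int) (rest : List Int) (n : Int) : List Int :=
  match rest with
  | [] => [n]
  | x :: xs => if x = prev then pvRunLens x xs (n + 1) else n :: pvRunLens x xs 1

-- Source B's longest_run: max(run_lengths(row), default=1).
def pvLongestRun (row : List Int) : Int :=
  match row with
  | [] => 1
  | x :: xs => (pvRunLens x xs 1).foldl max 1

-- Source B's max(range(len(matrix)), key=..., default=-1): first index with maximal key.
def pvArgmax (rows : List (List Int)) (i bestVal bestIdx : Int) : Int :=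
  match rows with
  | [] => bestIdx
  | row :: rs =>
    let v := pvLongestRun row
    if v > bestVal then pvArgmax rs (i + 1) v i else pvArgmax rs (i + 1) bestVal bestIdx

def number_rows_with_longest_series_alt (matrix : List (List Int)) : Int :=
  match matrix with
  | [] => -1
  | row :: rs => pvArgmax rs 1 (pvLongestRun row) 0

-- ===== PRECONDITION & SPEC =====
def Spec_number_rows_with_longest_series (matrix : List (List Int)) (out : Int) : Prop := out = number_rows_with_longest_series_alt matrix
instance (matrix : List (List Int)) (out : Int) : Decidable (Spec_number_rows_with_longest_series matrix out) := by unfold Spec_number_rows_with_longest_series; infer_instance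

-- ===== CLAIM (what is proved, stated in full; the proofs are below) =====
def Claim_equal_number_rows_with_longest_series : Prop := ∀ (matrix : List (List Int)), Dom_number_rows_with_longest_series matrix → Spec_number_rows_with_longest_series matrix (number_rows_with_longest_series matrix)

-- ===== LEMMAS AND PROOFS =====

-- the maximal run length of prev::rest when the current run already has length cur
def pvRowMax (prev : Int) (rest : List Int) (cur : Int) : Int :=
  match rest with
  | [] => cur
  | x :: xs => if x = prev then pvRowMax x xs (cur + 1) else max cur (pvRowMax x xs 1)

theorem le_pvRowMax (rest : List Int) : ∀ prev cur, cur ≤ pvRowMax prev rest cur := by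
  induction rest with
  | nil => intro prev cur; simp [pvRowMax]
  | cons x xs ih =>
    intro prev cur
    simp only [pvRowMax]
    split
    · exact le_trans (by omega) (ih x (cur + 1))
    · exact le_max_left _ _

theorem foldl_max_pvRunLens (rest : List Int) :
    ∀ prev n acc, (pvRunLens prev rest n).foldl max acc = max acc (pvRowMax prev rest n) := by
  induction rest with
  | nil => intro prev n acc; simp [pvRunLens, pvRowMax]
  | cons x xs ih =>
    intro prev n acc
    simp only [pvRunLens, pvRowMax]
    split
    · exact ih x (n + 1) acc
    · simp only [List.foldl_cons, ih x 1 (max acc n)]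
      rw [max_assoc]

theorem pvLongestRun_cons (p : Int) (rest : List Int) :
    pvLongestRun (p :: rest) = pvRowMax p rest 1 := by
  simp only [pvLongestRun, foldl_max_pvRunLens]
  have := le_pvRowMax rest p 1
  omega

theorem pvARow_eq (rest : List Int) :
    ∀ i prev cur maxL idx, pvARow i prev rest cur maxL idx =
      if pvRowMax prev rest cur > maxL then (pvRowMax prev rest cur, i) else (maxL, idx) := by
  induction rest with
  | nil => intro i prev cur maxL idx; simp [pvARow, pvRowMax]
  | cons x xs ih =>
    intro i prev cur maxL idx
    simp only [pvARow, pvRowMax]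
    split
    · exact ih i x (cur + 1) maxL idx
    · rw [ih, ih]
      have h1 := le_pvRowMax xs x 1
      by_cases h : pvRowMax x xs 1 ≤ cur
      · have : max cur (pvRowMax x xs 1) = cur := by omega
        rw [this]; split_ifs <;> simp_all <;> omega
      · have : max cur (pvRowMax x xs 1) = pvRowMax x xs 1 := by omega
        rw [this]; split_ifs <;> simp_all <;> omega

theorem pvAOuter_nilrow (i maxL idx : Int) (rs : List (List Int)) :
    pvAOuter i ([] :: rs) (maxL, idx) = pvAOuter (i + 1) rs (if 1 > maxL then ((1 : Int), i) else (maxL, idx)) := rfl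

theorem pvAOuter_consrow (i maxL idx p : Int) (rest : List Int) (rs : List (List Int)) :
    pvAOuter i ((p :: rest) :: rs) (maxL, idx) = pvAOuter (i + 1) rs (pvARow i p rest 1 maxL idx) := rfl

theorem pvAOuter_eq_argmax (rows : List (List Int)) :
    ∀ i maxL idx, (pvAOuter i rows (maxL, idx)).2 = pvArgmax rows i maxL idx := by
  induction rows with
  | nil => intro i maxL idx; simp [pvAOuter, pvArgmax]
  | cons row rs ih =>
    intro i maxL idx
    cases row with
    | nil =>
      rw [pvAOuter_nilrow]
      simp only [pvArgmax, pvLongestRun]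
      split <;> exact ih (i + 1) _ _
    | cons p rest =>
      rw [pvAOuter_consrow, pvARow_eq]
      simp only [pvArgmax]
      rw [pvLongestRun_cons]
      split <;> exact ih (i + 1) _ _

-- ===== VERDICT (by name: the statement is the Claim_ definition above) =====
theorem number_rows_with_longest_series_spec : Claim_equal_number_rows_with_longest_series := by
  intro matrix _
  show number_rows_with_longest_series matrix = number_rows_with_longest_series_alt matrix
  cases matrix with
  | nil => rfl
  | cons row rs =>
    simp only [number_rows_with_longest_series, number_rows_with_longest_series_alt]
    cases row with
    | nil =>
      rw [pvAOuter_nilrow, if_pos (by omega)]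
      simpa [pvLongestRun] using pvAOuter_eq_argmax rs (0 + 1) 1 0
    | cons p rest =>
      rw [pvAOuter_consrow, pvARow_eq, pvLongestRun_cons]
      have h := le_pvRowMax rest p 1
      rw [if_pos (by omega)]
      exact pvAOuter_eq_argmax rs (0 + 1) _ 0
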